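-- pv_equiv track=rewrite | github.com/ray-project/ray | python/ray/experimental/sgd/modified_allreduce.py | group_device_names
-- ===== SOURCE A (Python) =====
-- def group_device_names(devices, group_size):
--     """Group device names into groups of group_size.
--
--   Args:
--     devices: list of strings naming devices.
--     group_size: int >= 1
--
--   Returns:
--     list of lists of devices, where each inner list is group_size long,
--       and each device appears at least once in an inner list.  If
--       len(devices) % group_size = 0 then each device will appear
--       exactly once.
--
--   Raises:
--     ValueError: group_size > len(devices)
--   """
--     num_devices = len(devices)
--     if group_size > num_devices:
--         raise ValueError(
--             'only %d devices, but group_size=%d' % (num_devices, group_size))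
--     num_groups = (
--         num_devices // group_size + (1 if
--                                      (num_devices % group_size != 0) else 0))
--     groups = [[] for i in range(num_groups)]
--     for i in range(0, num_groups * group_size):
--         groups[i % num_groups].append(devices[i % num_devices])
--     return groups
-- ===== SOURCE B (Python) =====
-- def group_device_names(devices, group_size):
--     """Group device names into groups of group_size (round-robin).
--
--   Builds the round-robin assignment by materializing the cyclic stream of
--   devices (list repetition + truncation, no per-element modular arithmetic),
--   chunking it into rounds of num_groups consecutive elements, and
--   transposing the rounds: group g is column g of the round matrix."""
--     num_devices = len(devices)
--     if group_size > num_devices: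
--         raise ValueError(
--             'only %d devices, but group_size=%d' % (num_devices, group_size))
--     num_groups = -(-num_devices // group_size)
--     total = num_groups * group_size
--     reps = (total + num_devices - 1) // num_devices if num_devices else 0
--     flat = (devices * reps)[:total]
--     rounds = [flat[r * num_groups:(r + 1) * num_groups]
--               for r in range(group_size)]
--     return [list(col) for col in zip(*rounds)]
-- ===== Notes on version B (the rewrite author's own statement) =====
-- stated objective: alternative
-- what changed: Replaces A's scatter loop (preallocate num_groups empty lists, append element i of the flat index stream into groups[i % num_groups]) by a materialize-chunk-transpose pipeline: build the cyclic device stream by list repetition and truncation, slice it into group_size rounds of num_groups consecutive elements, and transpose the rounds with zip(*rounds) so that group g is column g.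
import Mathlib
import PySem

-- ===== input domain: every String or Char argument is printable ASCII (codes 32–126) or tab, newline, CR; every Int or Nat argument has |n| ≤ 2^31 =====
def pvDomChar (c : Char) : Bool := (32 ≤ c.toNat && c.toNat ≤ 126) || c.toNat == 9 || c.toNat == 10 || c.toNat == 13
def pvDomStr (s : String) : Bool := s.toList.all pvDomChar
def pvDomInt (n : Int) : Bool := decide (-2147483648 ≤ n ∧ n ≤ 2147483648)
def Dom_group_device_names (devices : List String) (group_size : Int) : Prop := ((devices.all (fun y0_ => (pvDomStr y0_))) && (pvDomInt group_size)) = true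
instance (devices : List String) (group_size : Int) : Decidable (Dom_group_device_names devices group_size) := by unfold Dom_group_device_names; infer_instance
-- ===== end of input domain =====

-- B builds the round-robin groups by materializing the cyclic device stream
-- (list repetition + truncation), chunking it into rounds, and transposing,
-- instead of A's scatter loop appending into preallocated lists (alternative, same cost).


-- ===== PORT A =====
def group_device_names (devices : List String) (group_size : Int) : List (List String) :=
  let num_devices : Int := devices.length
  if group_size > num_devices then []  -- Python raises ValueError here; excluded by Pre_
  else
    let num_groups : Int :=
      PySem.Int.floordiv num_devices group_size +
        (if PySem.Int.mod num_devices group_size ≠ 0 then 1 else 0)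
    let groups : List (List String) :=
      (PySem.List.pyRange 0 num_groups 1).map (fun _ => [])
    (PySem.List.pyRange 0 (num_groups * group_size) 1).foldl
      (fun gs i =>
        -- groups[i % num_groups].append(devices[i % num_devices]); on Pre_ both
        -- indices are in range, where the total forms pyGetD/pySetD are exact
        PySem.List.pySetD gs (PySem.Int.mod i num_groups)
          (PySem.List.pyGetD gs (PySem.Int.mod i num_groups) [] ++
            [PySem.List.pyGetD devices (PySem.Int.mod i num_devices) ""]))
      groups

-- ===== PORT B =====
-- zip(*rounds) followed by list(col): truncate to the shortest row and transpose.
def pvZipStar (ls : List (List String)) : List (List String) :=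
  if ls.isEmpty then []
  else
    let m := ((ls.map List.length).min?).getD 0
    (List.range m).map (fun i => ls.map (fun l => l.getD i ""))

def group_device_names_alt (devices : List String) (group_size : Int) : List (List String) :=
  let num_devices : Int := devices.length
  if group_size > num_devices then []  -- Python raises ValueError here; excluded by Pre_
  else
    let num_groups : Int := -(PySem.Int.floordiv (-num_devices) group_size)
    let total : Int := num_groups * group_size
    let reps : Int :=
      if num_devices ≠ 0 then PySem.Int.floordiv (total + num_devices - 1) num_devices else 0
    -- devices * reps: Python list repetition ([] for reps ≤ 0, matching toNat's clamp)
    let flat : List String :=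
      PySem.List.slice ((List.replicate reps.toNat devices).flatten) none (some total)
    let rounds : List (List String) :=
      (PySem.List.pyRange 0 group_size 1).map (fun r =>
        PySem.List.slice flat (some (r * num_groups)) (some ((r + 1) * num_groups)))
    pvZipStar rounds

-- ===== PRECONDITION & SPEC =====
-- Pre_ is exactly the set of inputs where Python A returns normally: for group_size > len
-- it raises ValueError, for group_size = 0 ZeroDivisionError, and for group_size < 0 with
-- len(devices) ≥ -group_size it raises IndexError (groups[i % num_groups] on an empty list).
def Pre_group_device_names (devices : List String) (group_size : Int) : Prop :=
  (1 ≤ group_size ∧ group_size ≤ devices.length) ∨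
  (group_size < 0 ∧ (devices.length : Int) + group_size < 0)
instance (devices : List String) (group_size : Int) : Decidable (Pre_group_device_names devices group_size) := by unfold Pre_group_device_names; infer_instance
def pvWitness_group_device_names : List String × Int := (["a", "b", "c", "d", "e"], 2)

def Spec_group_device_names (devices : List String) (group_size : Int) (out : List (List String)) : Prop := out = group_device_names_alt devices group_size
instance (devices : List String) (group_size : Int) (out : List (List String)) : Decidable (Spec_group_device_names devices group_size out) := by unfold Spec_group_device_names; infer_instance

-- ===== CLAIM (what is proved, stated in full; the proofs are below) =====
def Claim_equal_group_device_names : Prop := ∀ (devices : List String) (group_size : Int), Dom_group_device_names devices group_size → Pre_group_device_names devices group_size → Spec_group_device_names devices group_size (group_device_names devices group_size)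

-- ===== LEMMAS AND PROOFS =====

-- One step of A's scatter loop, in Nat-indexed form.
def pvStep (devices : List String) (N G : Nat) (gs : List (List String)) (k : Nat) : List (List String) :=
  gs.set (k % G) (gs.getD (k % G) [] ++ [devices.getD (k % N) ""])

-- Group g after j full rounds of A's loop.
def pvGroup (devices : List String) (N G : Nat) (j g : Nat) : List String :=
  (List.range j).map (fun j' => devices.getD ((g + j' * G) % N) "")

lemma pv_inner (devices : List String) (N G t : Nat)
    (s : Nat → List String) (m : Nat) (hm : m ≤ G) :
    ((List.range m).map (fun g => G * t + g)).foldl (pvStep devices N G)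
      ((List.range G).map s)
    = (List.range G).map
        (fun g => if g < m then s g ++ [devices.getD ((G * t + g) % N) ""] else s g) := by
  induction m with
  | zero => simp
  | succ m ih =>
    have hm' : m ≤ G := by omega
    rw [List.range_succ, List.map_append, List.foldl_append, ih hm']
    simp only [List.map_cons, List.map_nil, List.foldl_cons, List.foldl_nil]
    have hmod : (G * t + m) % G = m := by
      rw [Nat.add_comm, Nat.add_mul_mod_self_left, Nat.mod_eq_of_lt (by omega)]
    have hgetD :
        ((List.range G).map
          (fun g => if g < m then s g ++ [devices.getD ((G * t + g) % N) ""] else s g)).getD m []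
        = s m := by
      rw [List.getD_eq_getElem?_getD, List.getElem?_map, List.getElem?_range (by omega)]
      simp
    rw [pvStep, hmod, hgetD]
    apply List.ext_getElem
    · simp
    · intro i h1 h2
      simp only [List.length_set, List.length_map, List.length_range] at h1 h2
      simp only [List.getElem_set, List.getElem_map, List.getElem_range]
      by_cases him : m = i
      · subst him
        rw [if_pos rfl, if_pos (by omega)]
      · rw [if_neg him]
        by_cases hlt : i < m
        · rw [if_pos hlt, if_pos (by omega)]
        · rw [if_neg hlt, if_neg (by omega)]

lemma pv_outer (devices : List String) (N G : Nat) (j : Nat) :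
    (List.range (G * j)).foldl (pvStep devices N G)
      ((List.range G).map (fun _ => ([] : List String)))
    = (List.range G).map (pvGroup devices N G j) := by
  induction j with
  | zero =>
    rw [Nat.mul_zero, List.range_zero, List.foldl_nil]
    refine List.map_congr_left ?_
    intro g _
    simp [pvGroup]
  | succ j ih =>
    have hGj : G * (j + 1) = G * j + G := by ring
    rw [hGj, List.range_add, List.foldl_append, ih]
    rw [pv_inner devices N G j (pvGroup devices N G j) G (le_refl G)]
    apply List.map_congr_left
    intro g hg
    rw [List.mem_range] at hg
    rw [if_pos hg]
    unfold pvGroup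
    rw [List.range_succ, List.map_append, List.map_singleton]
    have hidx : G * j + g = g + j * G := by ring
    rw [hidx]

-- num_groups as a Nat: A computes n // gs + (1 iff remainder), i.e. the ceiling of N / gsn.
def pvG (N gsn : Nat) : Nat := N / gsn + (if N % gsn = 0 then 0 else 1)

-- In the main branch, B's -((-N) // gs) equals A's N // gs + (1 iff remainder).
lemma pv_ceil_eq (N gsn : Nat) (h1 : 1 ≤ gsn) (h2 : gsn ≤ N) :
    -(PySem.Int.floordiv (-(N : Int)) (gsn : Int)) = ((pvG N gsn : Nat) : Int) := by
  have hb : (0 : Int) < (gsn : Int) := by exact_mod_cast h1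
  rw [PySem.Int.neg_floordiv_neg_eq_iff_of_pos hb]
  have hdm := Nat.div_add_mod N gsn
  have hml : N % gsn < gsn := Nat.mod_lt _ (by omega)
  unfold pvG
  obtain ⟨k, hk⟩ : ∃ k, N / gsn = k := ⟨_, rfl⟩
  obtain ⟨r, hr⟩ : ∃ r, N % gsn = r := ⟨_, rfl⟩
  rw [hk] at hdm ⊢
  rw [hr] at hdm hml ⊢
  have hcN : (gsn : Int) * k + r = N := by exact_mod_cast hdm
  have hrl : (r : Int) < gsn := by exact_mod_cast hml
  by_cases h0 : r = 0
  · rw [if_pos h0]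
    have hr0 : (r : Int) = 0 := by exact_mod_cast h0
    have hk1 : (1 : Int) ≤ (k : Int) := by
      rcases Nat.eq_zero_or_pos k with h | h
      · exfalso; subst h; omega
      · exact_mod_cast h
    constructor
    · push_cast; nlinarith
    · push_cast; nlinarith
  · rw [if_neg h0]
    have hr1 : (1 : Int) ≤ (r : Int) := by exact_mod_cast (by omega : 1 ≤ r)
    constructor
    · push_cast; nlinarith
    · push_cast; nlinarith

lemma pv_A_floor_eq (N gsn : Nat) :
    PySem.Int.floordiv ((N : Int)) (gsn : Int) +
        (if PySem.Int.mod (N : Int) (gsn : Int) ≠ 0 then 1 else 0)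
      = ((pvG N gsn : Nat) : Int) := by
  rw [PySem.Int.floordiv_natCast, PySem.Int.mod_natCast]
  unfold pvG
  by_cases h0 : N % gsn = 0
  · have h1 : ¬ ((N % gsn : Nat) : Int) ≠ 0 := by simp [h0]
    rw [if_neg h1, if_pos h0]; push_cast; ring
  · have h1 : ((N % gsn : Nat) : Int) ≠ 0 := by exact_mod_cast h0
    rw [if_pos h1, if_neg h0]; push_cast; ring

-- In the branch group_size < 0 ∧ N + group_size < 0, A's num_groups is 0 ...
lemma pv_A_zero (N : Nat) (b : Int) (hb : b < 0) (hN : (N : Int) + b < 0) :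
    PySem.Int.floordiv ((N : Int)) b + (if PySem.Int.mod (N : Int) b ≠ 0 then 1 else 0) = 0 := by
  have hdm := PySem.Int.floordiv_mul_add_mod (N : Int) b
  have hbd := PySem.Int.mod_neg_bounds (N : Int) hb
  set q := PySem.Int.floordiv (N : Int) b with hq
  set m := PySem.Int.mod (N : Int) b with hm
  have hN0 : (0 : Int) ≤ (N : Int) := by exact_mod_cast Nat.zero_le N
  by_cases h0 : m = 0
  · have hq0 : q = 0 := by
      rcases lt_trichotomy q 0 with h | h | h
      · exfalso
        nlinarith [mul_nonneg (by omega : (0:Int) ≤ -q - 1) (by omega : (0:Int) ≤ -b)]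
      · exact h
      · exfalso; nlinarith [mul_pos h (by omega : (0:Int) < -b)]
    simp [h0, hq0]
  · have hm1 : m ≤ -1 := by omega
    have hq1 : q = -1 := by
      have hlb : 0 < q * b := by linarith
      have hub : q * b < -2 * b := by linarith
      rcases lt_trichotomy q (-1) with h | h | h
      · exfalso; nlinarith [mul_nonneg (by omega : (0:Int) ≤ -q - 2) (by omega : (0:Int) ≤ -b)]
      · exact h
      · exfalso
        nlinarith [mul_nonneg (by omega : (0:Int) ≤ q) (by omega : (0:Int) ≤ -b)]
    simp [h0, hq1]

-- ... and B's num_groups is 0 as well.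
lemma pv_B_zero (N : Nat) (b : Int) (hb : b < 0) (hN : (N : Int) + b < 0) :
    -(PySem.Int.floordiv (-(N : Int)) b) = 0 := by
  have hdm := PySem.Int.floordiv_mul_add_mod (-(N : Int)) b
  have hbd := PySem.Int.mod_neg_bounds (-(N : Int)) hb
  set q := PySem.Int.floordiv (-(N : Int)) b with hq
  set m := PySem.Int.mod (-(N : Int)) b with hm
  have hN0 : (0 : Int) ≤ (N : Int) := by exact_mod_cast Nat.zero_le N
  have hq0 : q = 0 := by
    rcases lt_trichotomy q 0 with h | h | h
    · exfalso
      nlinarith [mul_nonneg (by omega : (0:Int) ≤ -q - 1) (by omega : (0:Int) ≤ -b)]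
    · exact h
    · exfalso
      nlinarith [mul_nonneg (by omega : (0:Int) ≤ q - 1) (by omega : (0:Int) ≤ -b)]
  omega

-- The cyclic stream: element i of devices*R is devices[i % N] (N = devices.length > 0).
lemma pv_flatten_replicate_getD (devices : List String) (R i : Nat)
    (hi : i < R * devices.length) :
    ((List.replicate R devices).flatten).getD i "" = devices.getD (i % devices.length) "" := by
  induction R generalizing i with
  | zero => omega
  | succ R ih =>
    rw [List.replicate_succ, List.flatten_cons]
    have hRL : (R + 1) * devices.length = R * devices.length + devices.length := by ring
    by_cases h : i < devices.length
    · rw [List.getD_eq_getElem?_getD, List.getElem?_append_left h,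
        ← List.getD_eq_getElem?_getD, Nat.mod_eq_of_lt h]
    · rw [List.getD_eq_getElem?_getD, List.getElem?_append_right (by omega),
        ← List.getD_eq_getElem?_getD, ih (i - devices.length) (by omega)]
      congr 1
      conv_rhs => rw [show i = (i - devices.length) + 1 * devices.length by omega]
      rw [Nat.add_mul_mod_self_right]

lemma pv_flatten_replicate_length (devices : List String) (R : Nat) :
    ((List.replicate R devices).flatten).length = R * devices.length := by
  simp [List.length_flatten]

-- zip(*rounds) when every row has length G and there is at least one row.
lemma pv_zipStar_const (ls : List (List String)) (G : Nat)
    (hne : ls ≠ []) (hlen : ∀ l ∈ ls, l.length = G) :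
    pvZipStar ls = (List.range G).map (fun i => ls.map (fun l => l.getD i "")) := by
  unfold pvZipStar
  rw [if_neg (by simpa using hne)]
  have hmin : ((ls.map List.length).min?).getD 0 = G := by
    rcases ls with _ | ⟨l, rest⟩
    · exact absurd rfl hne
    · have hall : ∀ x ∈ (l :: rest).map List.length, x = G := by
        intro x hx
        rw [List.mem_map] at hx
        obtain ⟨y, hy, hxy⟩ := hx
        rw [← hxy]; exact hlen y hy
      rcases hmin : ((l :: rest).map List.length).min? with _ | m
      · simp at hmin
      · have hm := List.min?_mem hmin
        simp [hall _ hm]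
  rw [hmin]


-- B in the main branch 1 ≤ gsn ≤ N evaluates to the closed round-robin form.
lemma pv_B_main (devices : List String) (gsn : Nat)
    (h1 : 1 ≤ gsn) (h2 : gsn ≤ devices.length) :
    group_device_names_alt devices (gsn : Int)
      = (List.range (pvG devices.length gsn)).map
          (fun a => (List.range gsn).map
            (fun b => devices.getD ((a + b * pvG devices.length gsn) % devices.length) "")) := by
  unfold group_device_names_alt
  set N := devices.length with hN
  set G := pvG N gsn with hG
  have hN1 : 1 ≤ N := le_trans h1 h2
  have hG1 : 1 ≤ G := by
    rw [hG]
    unfold pvG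
    have hdle : 1 ≤ N / gsn := (Nat.one_le_div_iff (by omega)).mpr h2
    omega
  have hng : ¬ ((N : Int) < (gsn : Int)) := by exact_mod_cast not_lt.mpr h2
  simp only [gt_iff_lt, if_neg hng]
  rw [pv_ceil_eq N gsn h1 h2, ← hG]
  -- total and reps
  have htot : (G : Int) * (gsn : Int) = ((G * gsn : Nat) : Int) := by push_cast; ring
  set T := G * gsn with hT
  have hNe : ((N : Int)) ≠ 0 := by exact_mod_cast (by omega : N ≠ 0)
  rw [if_pos hNe, htot]
  have hcast : ((T : Nat) : Int) + (N : Int) - 1 = ((T + (N - 1) : Nat) : Int) := by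
    push_cast [Nat.cast_sub hN1]; ring
  rw [hcast, PySem.Int.floordiv_natCast]
  set R := (T + (N - 1)) / N with hR
  have hRN : T ≤ R * N := by
    have := Nat.div_add_mod (T + (N - 1)) N
    have hm : (T + (N - 1)) % N < N := Nat.mod_lt _ (by omega)
    rw [← hR] at this
    have hc : N * R = R * N := Nat.mul_comm _ _
    omega
  have htoNat : (((R : Nat) : Int)).toNat = R := Int.toNat_natCast R
  rw [htoNat]
  have hflatlen : ((List.replicate R devices).flatten).length = R * N :=
    pv_flatten_replicate_length devices R
  set flat := PySem.List.slice ((List.replicate R devices).flatten) none (some ((T : Nat) : Int))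
    with hflat
  have hflat' : flat = ((List.replicate R devices).flatten).take T := by
    rw [hflat, PySem.List.slice_to_natCast]
  have hflatlen' : flat.length = T := by
    rw [hflat', List.length_take, hflatlen]
    omega
  have hflatget : ∀ i, i < T → flat.getD i "" = devices.getD (i % N) "" := by
    intro i hi
    rw [hflat', List.getD_eq_getElem?_getD, List.getElem?_take_of_lt hi,
      ← List.getD_eq_getElem?_getD]
    exact pv_flatten_replicate_getD devices R i (by rw [← hN]; omega)
  -- rounds
  rw [PySem.List.pyRange_zero_natCast]
  have hround : ∀ r : Nat, r < gsn →
      PySem.List.slice flat (some (((r : Nat) : Int) * (G : Int)))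
          (some ((((r : Nat) : Int) + 1) * (G : Int)))
        = (flat.drop (r * G)).take G := by
    intro r hr
    have e1 : ((r : Nat) : Int) * (G : Int) = ((r * G : Nat) : Int) := by push_cast; ring
    have e2 : (((r : Nat) : Int) + 1) * (G : Int) = ((r * G : Nat) : Int) + ((G : Nat) : Int) := by
      push_cast; ring
    rw [e1, e2, PySem.List.slice_natCast_add]
  have hroundlen : ∀ r : Nat, r < gsn → ((flat.drop (r * G)).take G).length = G := by
    intro r hr
    rw [List.length_take, List.length_drop, hflatlen']
    have : (r + 1) * G ≤ T := by
      rw [hT, Nat.mul_comm G gsn]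
      exact Nat.mul_le_mul_right G hr
    have hd : (r + 1) * G = r * G + G := by ring
    omega
  simp only [List.map_map, Function.comp_def]
  rw [List.map_congr_left (fun r hr => by
    rw [hround r (List.mem_range.mp hr)])]
  rw [pv_zipStar_const _ G (by
      intro h
      rw [List.map_eq_nil_iff, List.range_eq_nil] at h
      omega)
    (by
      intro l hl
      rw [List.mem_map] at hl
      obtain ⟨r, hr, rfl⟩ := hl
      exact hroundlen r (List.mem_range.mp hr))]
  apply List.map_congr_left
  intro a ha
  rw [List.mem_range] at ha
  rw [List.map_map, Function.comp_def]
  apply List.map_congr_left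
  intro b hb
  rw [List.mem_range] at hb
  have hidx : b * G + a < T := by
    have : (b + 1) * G ≤ T := by
      rw [hT, Nat.mul_comm G gsn]
      exact Nat.mul_le_mul_right G hb
    have hd : (b + 1) * G = b * G + G := by ring
    omega
  have : ((flat.drop (b * G)).take G).getD a "" = flat.getD (b * G + a) "" := by
    rw [List.getD_eq_getElem?_getD, List.getElem?_take_of_lt (by omega : a < G),
      List.getElem?_drop, ← List.getD_eq_getElem?_getD]
  have hcomm : b * G + a = a + b * G := Nat.add_comm _ _
  rw [this, hflatget _ hidx, hcomm]

-- ===== VERDICT (by name: the statement is the Claim_ definition above) =====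
theorem group_device_names_spec : Claim_equal_group_device_names := by
  intro devices group_size _ hpre
  unfold Spec_group_device_names
  rcases hpre with ⟨h1, h2⟩ | ⟨h1, h2⟩
  · -- main branch: 1 ≤ group_size ≤ len(devices)
    obtain ⟨gsn, rfl⟩ : ∃ gsn : Nat, group_size = (gsn : Int) :=
      ⟨group_size.toNat, (Int.toNat_of_nonneg (by omega)).symm⟩
    have h1n : 1 ≤ gsn := by exact_mod_cast h1
    have h2n : gsn ≤ devices.length := by exact_mod_cast h2
    rw [pv_B_main devices gsn h1n h2n]
    unfold group_device_names
    have hng : ¬ ((devices.length : Int) < (gsn : Int)) := by omega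
    simp only [gt_iff_lt, if_neg hng]
    rw [pv_A_floor_eq devices.length gsn]
    simp only [← Nat.cast_mul, PySem.List.pyRange_zero_nat, List.foldl_map,
      List.map_map, Function.comp_def, PySem.Int.mod_natCast, PySem.List.pySetD_natCast,
      PySem.List.pyGetD_natCast]
    show (List.range (pvG devices.length gsn * gsn)).foldl
          (pvStep devices devices.length (pvG devices.length gsn))
          ((List.range (pvG devices.length gsn)).map (fun _ => ([] : List String)))
        = (List.range (pvG devices.length gsn)).map
            (fun a => (List.range gsn).map
              (fun b => devices.getD ((a + b * pvG devices.length gsn) % devices.length) ""))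
    rw [pv_outer devices devices.length (pvG devices.length gsn) gsn]
    rfl
  · -- degenerate branch: group_size < 0 and len(devices) < -group_size; both return []
    unfold group_device_names group_device_names_alt
    have hng : ¬ ((devices.length : Int) < group_size) := by omega
    simp only [gt_iff_lt, if_neg hng]
    rw [pv_A_zero devices.length group_size h1 h2, pv_B_zero devices.length group_size h1 h2]
    have hrange : PySem.List.pyRange 0 group_size 1 = ([] : List Int) := by
      simp [PySem.List.pyRange]
      omega
    rw [hrange]
    simp [pvZipStar]
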